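-- pv_equiv track=rewrite | github.com/frankligy/exercise_codes | deepLearning/dilated_CNN_immuno.py | dict_inventory
-- ===== SOURCE A (Python) =====
-- def dict_inventory(inventory):
--     dicA,dicB,dicC = {},{},{}
--     dic = {'A':dicA,'B':dicB,'C':dicC}
--
--     for hla in inventory:
--         type_ = hla[0]  # A,B,C
--         first2 = hla[1:3] # 01
--         last2 = hla[3:5]  # 01
--         try:
--             dic[type_][first2].append(last2)
--         except KeyError:
--             dic[type_][first2] = []
--             dic[type_][first2].append(last2)
--
--     return dic
-- ===== SOURCE B (Python) =====
-- def dict_inventory(inventory):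
--     by_type = {'A': [], 'B': [], 'C': []}
--     for hla in inventory:
--         by_type[hla[0]].append(hla)
--     result = {}
--     for t, codes in by_type.items():
--         inner = {}
--         for hla in codes:
--             inner.setdefault(hla[1:3], []).append(hla[3:5])
--         result[t] = inner
--     return result
-- ===== Notes on version B (the rewrite author's own statement) =====
-- stated objective: alternative
-- what changed: Replaces A's single pass with try/except-driven dict building by a two-pass scheme: first partition the inventory into a fixed by_type dict keyed by the leading letter, then group each type's codes with setdefault into an inner dict.
import Mathlib
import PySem

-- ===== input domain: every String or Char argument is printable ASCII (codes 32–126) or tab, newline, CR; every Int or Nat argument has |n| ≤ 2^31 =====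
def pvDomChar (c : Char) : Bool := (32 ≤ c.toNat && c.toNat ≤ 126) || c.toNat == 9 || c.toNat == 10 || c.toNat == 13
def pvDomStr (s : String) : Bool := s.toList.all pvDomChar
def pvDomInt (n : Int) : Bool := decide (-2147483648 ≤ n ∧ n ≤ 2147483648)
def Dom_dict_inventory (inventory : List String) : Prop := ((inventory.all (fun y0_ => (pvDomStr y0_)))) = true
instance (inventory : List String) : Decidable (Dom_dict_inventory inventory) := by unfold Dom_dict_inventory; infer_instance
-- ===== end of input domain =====

-- B replaces A's single try/except-driven pass by a two-pass partition-then-group scheme (alternative decomposition, same cost).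

-- ===== PORT A =====
-- try: dic[type_][first2].append(last2)  /  except KeyError: dic[type_][first2] = []; dic[type_][first2].append(last2)
def pvInnerA (d : PySem.Dict String (List String)) (first2 last2 : String) :
    PySem.Dict String (List String) :=
  match d.get? first2 with
  | some lst => d.insert first2 (lst ++ [last2])
  | none => (d.insert first2 []).modify first2 [] (fun l => l ++ [last2])

-- one iteration of A's loop over the three inner dicts (dicA, dicB, dicC of dic)
def pvStepA (s : PySem.Dict String (List String) × PySem.Dict String (List String) × PySem.Dict String (List String))
    (hla : String) :
    PySem.Dict String (List String) × PySem.Dict String (List String) × PySem.Dict String (List String) :=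
  match PySem.Str.pyGet? hla 0 with
  | none => s            -- Python: IndexError on hla[0] (excluded by Pre_)
  | some c =>
    let first2 := PySem.Str.slice hla (some 1) (some 3)
    let last2 := PySem.Str.slice hla (some 3) (some 5)
    if c = 'A' then (pvInnerA s.1 first2 last2, s.2.1, s.2.2)
    else if c = 'B' then (s.1, pvInnerA s.2.1 first2 last2, s.2.2)
    else if c = 'C' then (s.1, s.2.1, pvInnerA s.2.2 first2 last2)
    else s               -- Python: KeyError on dic[type_] (excluded by Pre_)

def dict_inventory (inventory : List String) : List (String × List (String × List String)) :=
  let s := inventory.foldl pvStepA (PySem.Dict.empty, PySem.Dict.empty, PySem.Dict.empty)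
  [("A", s.1.items), ("B", s.2.1.items), ("C", s.2.2.items)]

-- ===== PORT B =====
-- by_type[hla[0]].append(hla)
def pvStepByType (d : PySem.Dict String (List String)) (hla : String) :
    PySem.Dict String (List String) :=
  match PySem.Str.pyGet? hla 0 with
  | none => d            -- Python: IndexError on hla[0] (excluded by Pre_)
  | some c =>
    match d.get? (String.ofList [c]) with
    | some lst => d.insert (String.ofList [c]) (lst ++ [hla])
    | none => d          -- Python: KeyError (excluded by Pre_)

-- inner.setdefault(hla[1:3], []).append(hla[3:5])
def pvInnerB (d : PySem.Dict String (List String)) (hla : String) :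
    PySem.Dict String (List String) :=
  let first2 := PySem.Str.slice hla (some 1) (some 3)
  let last2 := PySem.Str.slice hla (some 3) (some 5)
  (d.setdefault first2 []).modify first2 [] (fun l => l ++ [last2])

def dict_inventory_alt (inventory : List String) : List (String × List (String × List String)) :=
  let byType := inventory.foldl pvStepByType
    (PySem.Dict.ofList [("A", []), ("B", []), ("C", [])])
  byType.items.foldl
    (fun res p => res ++ [(p.1, (p.2.foldl pvInnerB PySem.Dict.empty).items)]) []

-- ===== PRECONDITION & SPEC =====
-- Pre_ excludes exactly the inputs on which A raises: an empty code (IndexError on hla[0])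
-- or a code whose first character is not 'A'/'B'/'C' (KeyError on dic lookup).
def Pre_dict_inventory (inventory : List String) : Prop :=
  ∀ hla ∈ inventory, hla.toList.head? = some 'A' ∨ hla.toList.head? = some 'B' ∨ hla.toList.head? = some 'C'
instance (inventory : List String) : Decidable (Pre_dict_inventory inventory) := by
  unfold Pre_dict_inventory; infer_instance

def pvWitness_dict_inventory : List String := ["A0101", "B0702", "A0102", "C1203"]

def Spec_dict_inventory (inventory : List String) (out : List (String × List (String × List String))) : Prop := out = dict_inventory_alt inventory
instance (inventory : List String) (out : List (String × List (String × List String))) : Decidable (Spec_dict_inventory inventory out) := by unfold Spec_dict_inventory; infer_instance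

-- ===== CLAIM (what is proved, stated in full; the proofs are below) =====
def Claim_equal_dict_inventory : Prop := ∀ (inventory : List String), Dom_dict_inventory inventory → Pre_dict_inventory inventory → Spec_dict_inventory inventory (dict_inventory inventory)

-- ===== LEMMAS AND PROOFS =====

-- the list of codes with leading letter c, in inventory order
def pvFilt (c : Char) (inv : List String) : List String :=
  inv.filter (fun h => h.toList.head? == some c)

theorem pvHead0 (s : String) (c : Char) (t : List Char) (h : s.toList = c :: t) :
    PySem.Str.pyGet? s 0 = some c := by
  simp [PySem.Str.pyGet?, PySem.List.pyGet?, PySem.List.pyIdx?, h]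

-- both inner-loop bodies perform d[first2] := d.get(first2, []) ++ [last2]
theorem pvSetAppend (d : PySem.Dict String (List String)) (k v : String) :
    (d.setdefault k []).modify k [] (fun l => l ++ [v]) =
      match d.get? k with
      | some lst => d.insert k (lst ++ [v])
      | none => (d.insert k []).modify k [] (fun l => l ++ [v]) := by
  cases h : d.get? k with
  | some lst =>
    simp [PySem.Dict.setdefault, PySem.Dict.modify, PySem.Dict.contains_eq_isSome_get?, h,
      PySem.Dict.getD_eq_get?_getD]
  | none =>
    rw [PySem.Dict.setdefault_of_not_contains d [] (by rw [PySem.Dict.contains_eq_isSome_get?, h]; rfl)]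

theorem pvInnerB_eq (d : PySem.Dict String (List String)) (hla : String) :
    pvInnerB d hla =
      pvInnerA d (PySem.Str.slice hla (some 1) (some 3)) (PySem.Str.slice hla (some 3) (some 5)) := by
  unfold pvInnerA pvInnerB
  exact pvSetAppend d _ _

-- A's loop acts componentwise: each inner dict accumulates exactly its type's codes, in order
theorem pvStepA_fold (inv : List String)
    (hok : ∀ hla ∈ inv, hla.toList.head? = some 'A' ∨ hla.toList.head? = some 'B' ∨ hla.toList.head? = some 'C')
    (s : PySem.Dict String (List String) × PySem.Dict String (List String) × PySem.Dict String (List String)) :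
    inv.foldl pvStepA s =
      ((pvFilt 'A' inv).foldl pvInnerB s.1,
       (pvFilt 'B' inv).foldl pvInnerB s.2.1,
       (pvFilt 'C' inv).foldl pvInnerB s.2.2) := by
  induction inv generalizing s with
  | nil => simp [pvFilt]
  | cons hla rest ih =>
    have hmem := hok hla (by simp)
    have hok' : ∀ h ∈ rest, h.toList.head? = some 'A' ∨ h.toList.head? = some 'B' ∨ h.toList.head? = some 'C' :=
      fun h hm => hok h (by simp [hm])
    obtain ⟨c, t, ht, hc⟩ : ∃ c t, hla.toList = c :: t ∧ (c = 'A' ∨ c = 'B' ∨ c = 'C') := by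
      cases hl : hla.toList with
      | nil => simp [hl] at hmem
      | cons c t => exact ⟨c, t, rfl, by simpa [hl] using hmem⟩
    have hstep : pvStepA s hla =
        if c = 'A' then (pvInnerB s.1 hla, s.2.1, s.2.2)
        else if c = 'B' then (s.1, pvInnerB s.2.1 hla, s.2.2)
        else (s.1, s.2.1, pvInnerB s.2.2 hla) := by
      unfold pvStepA
      rw [pvHead0 hla c t ht]
      rcases hc with h | h | h <;> simp [h, ← pvInnerB_eq]
    rcases hc with h | h | h <;>
      simp only [List.foldl_cons, hstep, h, if_true] <;>
      rw [ih hok'] <;>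
      simp [pvFilt, ht, h]
  
-- B's first pass partitions the inventory by leading letter, preserving order
theorem pvByType_fold (inv : List String)
    (hok : ∀ hla ∈ inv, hla.toList.head? = some 'A' ∨ hla.toList.head? = some 'B' ∨ hla.toList.head? = some 'C')
    (a b c : List String) :
    inv.foldl pvStepByType (PySem.Dict.ofList [("A", a), ("B", b), ("C", c)]) =
      PySem.Dict.ofList [("A", a ++ pvFilt 'A' inv), ("B", b ++ pvFilt 'B' inv), ("C", c ++ pvFilt 'C' inv)] := by
  induction inv generalizing a b c with
  | nil => simp [pvFilt]
  | cons hla rest ih =>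
    have hmem := hok hla (by simp)
    have hok' : ∀ h ∈ rest, h.toList.head? = some 'A' ∨ h.toList.head? = some 'B' ∨ h.toList.head? = some 'C' :=
      fun h hm => hok h (by simp [hm])
    obtain ⟨ch, t, ht, hc⟩ : ∃ ch t, hla.toList = ch :: t ∧ (ch = 'A' ∨ ch = 'B' ∨ ch = 'C') := by
      cases hl : hla.toList with
      | nil => simp [hl] at hmem
      | cons ch t => exact ⟨ch, t, rfl, by simpa [hl] using hmem⟩
    rcases hc with h | h | h <;> subst h
    · have hstep : pvStepByType (PySem.Dict.ofList [("A", a), ("B", b), ("C", c)]) hla =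
          PySem.Dict.ofList [("A", a ++ [hla]), ("B", b), ("C", c)] := by
        unfold pvStepByType; rw [pvHead0 hla _ t ht]; rfl
      rw [List.foldl_cons, hstep, ih hok']
      simp [pvFilt, ht]
    · have hstep : pvStepByType (PySem.Dict.ofList [("A", a), ("B", b), ("C", c)]) hla =
          PySem.Dict.ofList [("A", a), ("B", b ++ [hla]), ("C", c)] := by
        unfold pvStepByType; rw [pvHead0 hla _ t ht]; rfl
      rw [List.foldl_cons, hstep, ih hok']
      simp [pvFilt, ht]
    · have hstep : pvStepByType (PySem.Dict.ofList [("A", a), ("B", b), ("C", c)]) hla =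
          PySem.Dict.ofList [("A", a), ("B", b), ("C", c ++ [hla])] := by
        unfold pvStepByType; rw [pvHead0 hla _ t ht]; rfl
      rw [List.foldl_cons, hstep, ih hok']
      simp [pvFilt, ht]

-- ===== VERDICT (by name: the statement is the Claim_ definition above) =====
theorem dict_inventory_spec : Claim_equal_dict_inventory := by
  intro inv _ hpre
  unfold Spec_dict_inventory
  show dict_inventory inv = dict_inventory_alt inv
  unfold dict_inventory dict_inventory_alt
  rw [pvByType_fold inv hpre [] [] [], pvStepA_fold inv hpre]
  rfl
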